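-- pv_equiv track=rewrite | github.com/prondubuisi/code-interview-prep | bloomberg/sunline.py | sunline
-- ===== SOURCE A (Python) =====
-- def sunline(nums):
--     ts = 0
--     store = []
--     start = len(nums) -1
--
--     while start >= 0:
--         if nums[start] > ts:
--             store.append(start)
--             ts = nums[start]
--
--         start -= 1
--     return store
-- ===== SOURCE B (Python) =====
-- def sunline(nums):
--     # left-to-right monotonic stack: keep candidate indices whose values are
--     # strictly decreasing from bottom to top; a later element >= a candidate
--     # shadows it; only positive elements can be visible (the 0 baseline).
--     stack = []
--     for i, x in enumerate(nums):
--         while stack and nums[stack[-1]] <= x: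
--             stack.pop()
--         if x > 0:
--             stack.append(i)
--     return stack[::-1]
-- ===== Notes on version B (the rewrite author's own statement) =====
-- stated objective: alternative
-- what changed: Replaces A's right-to-left scan with a mutable running maximum by a left-to-right monotonic-stack sweep: each element pops shadowed candidates, positive elements are pushed, and the stack (reversed) is the answer.
import Mathlib
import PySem

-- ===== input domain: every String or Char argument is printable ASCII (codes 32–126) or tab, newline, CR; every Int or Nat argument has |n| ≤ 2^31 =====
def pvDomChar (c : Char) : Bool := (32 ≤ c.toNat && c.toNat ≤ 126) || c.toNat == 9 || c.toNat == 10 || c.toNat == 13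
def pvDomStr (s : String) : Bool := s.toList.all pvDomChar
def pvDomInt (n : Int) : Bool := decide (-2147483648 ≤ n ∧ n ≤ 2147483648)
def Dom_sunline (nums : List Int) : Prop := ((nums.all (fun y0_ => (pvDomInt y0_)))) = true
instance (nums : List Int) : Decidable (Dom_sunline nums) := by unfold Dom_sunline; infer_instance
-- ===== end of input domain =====

-- B replaces A's right-to-left running-max scan by a left-to-right monotonic-stack
-- sweep (an alternative one-pass algorithm of the same cost).

-- ===== PORT A =====
-- A's while-loop: fuel n+1 means start = n; ts and store are the loop state.
def sunlineGo (nums : List Int) : Int → List Int → Nat → List Int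
  | _, store, 0 => store
  | ts, store, n+1 =>
    -- nums[start]: start is always a valid index here, so the default is never used
    let v := PySem.List.pyGetD nums (n : Int) 0
    if v > ts then sunlineGo nums v (store ++ [(n : Int)]) n
    else sunlineGo nums ts store n

def sunline (nums : List Int) : List Int :=
  sunlineGo nums 0 [] nums.length

-- ===== PORT B =====
-- the 'while stack and nums[stack[-1]] <= x: stack.pop()' loop of Source B;
-- the stack is kept TOP-FIRST here, so Python's stack[-1]/pop()/append at the
-- right end are head/tail/cons, and the final stack[::-1] is the stack as built.
def popShadowed (nums : List Int) (x : Int) : List Int → List Int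
  | [] => []
  | j :: rest =>
    if PySem.List.pyGetD nums j 0 ≤ x then popShadowed nums x rest
    else j :: rest

-- the 'for i, x in enumerate(nums)' loop of Source B
def sunline_alt (nums : List Int) : List Int :=
  (PySem.List.enumerate nums 0).foldl
    (fun stack p =>
      let s := popShadowed nums p.2 stack
      if p.2 > 0 then p.1 :: s else s) []

-- ===== PRECONDITION & SPEC =====
def Spec_sunline (nums : List Int) (out : List Int) : Prop := out = sunline_alt nums
instance (nums : List Int) (out : List Int) : Decidable (Spec_sunline nums out) := by unfold Spec_sunline; infer_instance

-- ===== CLAIM (what is proved, stated in full; the proofs are below) =====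
def Claim_equal_sunline : Prop := ∀ (nums : List Int), Dom_sunline nums → Spec_sunline nums (sunline nums)

-- ===== LEMMAS AND PROOFS =====

-- the descending list of indices < k that A keeps, given running max ts
def visAux (nums : List Int) : Nat → Int → List Int
  | 0, _ => []
  | k+1, ts =>
    if nums.getD k 0 > ts then (k : Int) :: visAux nums k (nums.getD k 0)
    else visAux nums k ts

theorem pv_visAux_pos (nums : List Int) (k : Nat) (ts : Int) (h : nums.getD k 0 > ts) :
    visAux nums (k+1) ts = (k : Int) :: visAux nums k (nums.getD k 0) := by
  show (if nums.getD k 0 > ts then (k : Int) :: visAux nums k (nums.getD k 0)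
        else visAux nums k ts) = _
  rw [if_pos h]

theorem pv_visAux_neg (nums : List Int) (k : Nat) (ts : Int) (h : ¬ nums.getD k 0 > ts) :
    visAux nums (k+1) ts = visAux nums k ts := by
  show (if nums.getD k 0 > ts then (k : Int) :: visAux nums k (nums.getD k 0)
        else visAux nums k ts) = _
  rw [if_neg h]

theorem pv_pop_cons (nums : List Int) (x : Int) (j : Int) (rest : List Int) :
    popShadowed nums x (j :: rest) =
    if PySem.List.pyGetD nums j 0 ≤ x then popShadowed nums x rest else j :: rest := rfl

theorem pv_go_eq_visAux (nums : List Int) (n : Nat) :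
    ∀ (ts : Int) (store : List Int),
      sunlineGo nums ts store n = store ++ visAux nums n ts := by
  induction n with
  | zero => intro ts store; simp [sunlineGo, visAux]
  | succ n ih =>
    intro ts store
    show (if PySem.List.pyGetD nums (n : Int) 0 > ts then
            sunlineGo nums (PySem.List.pyGetD nums (n : Int) 0) (store ++ [(n : Int)]) n
          else sunlineGo nums ts store n) = store ++ visAux nums (n + 1) ts
    rw [PySem.List.pyGetD_natCast]
    by_cases h : nums.getD n 0 > ts
    · rw [if_pos h, ih, pv_visAux_pos nums n ts h, List.append_assoc]
      rfl
    · rw [if_neg h, ih, pv_visAux_neg nums n ts h]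

-- popping all stack values ≤ x from A's kept list raises the threshold to max ts x
theorem pv_pop_visAux (nums : List Int) (k : Nat) :
    ∀ (ts x : Int), popShadowed nums x (visAux nums k ts) = visAux nums k (max ts x) := by
  induction k with
  | zero => intro ts x; simp [visAux, popShadowed]
  | succ k ih =>
    intro ts x
    by_cases h : nums.getD k 0 > ts
    · rw [pv_visAux_pos nums k ts h, pv_pop_cons, PySem.List.pyGetD_natCast]
      by_cases hx : nums.getD k 0 ≤ x
      · rw [if_pos hx, ih]
        have hts : ts < x := lt_of_lt_of_le h hx
        have h1 : max (nums.getD k 0) x = x := max_eq_right hx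
        have h2 : max ts x = x := max_eq_right hts.le
        have hk : ¬ nums.getD k 0 > max ts x := by rw [h2]; omega
        rw [h1, pv_visAux_neg nums k (max ts x) hk, h2]
      · rw [if_neg hx]
        have hk : nums.getD k 0 > max ts x := by omega
        rw [pv_visAux_pos nums k (max ts x) hk]
    · rw [pv_visAux_neg nums k ts h, ih]
      have hk : ¬ nums.getD k 0 > max ts x := by omega
      rw [pv_visAux_neg nums k (max ts x) hk]

-- B's invariant: after the first k elements the stack is A's kept list for the prefix
theorem pv_fold_prefix (nums : List Int) (k : Nat) (hk : k ≤ nums.length) :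
    (PySem.List.enumerate (nums.take k) 0).foldl
      (fun stack p =>
        let s := popShadowed nums p.2 stack
        if p.2 > 0 then p.1 :: s else s) [] = visAux nums k 0 := by
  induction k with
  | zero => simp [visAux]
  | succ k ih =>
    have hklt : k < nums.length := hk
    have htake : nums.take (k + 1) = nums.take k ++ [nums[k]] := by
      rw [List.take_add_one]
      simp [List.getElem?_eq_getElem hklt]
    rw [htake, PySem.List.enumerate_append, List.foldl_append,
      ih (Nat.le_of_succ_le hk)]
    have hlen : ((0 : Int) + ((nums.take k).length : Int)) = (k : Int) := by
      simp [List.length_take, Nat.min_eq_left (Nat.le_of_succ_le hk)]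
    rw [hlen]
    show (let s := popShadowed nums nums[k] (visAux nums k 0);
          if nums[k] > 0 then (k : Int) :: s else s) = visAux nums (k + 1) 0
    rw [show popShadowed nums nums[k] (visAux nums k 0) = visAux nums k (max 0 nums[k]) from
      pv_pop_visAux nums k 0 nums[k]]
    have hget : nums.getD k 0 = nums[k] := List.getD_eq_getElem _ _ hklt
    by_cases h : nums[k] > 0
    · have hm : max 0 nums[k] = nums[k] := max_eq_right h.le
      have hp : nums.getD k 0 > 0 := by omega
      simp only [hm, if_pos h]
      rw [pv_visAux_pos nums k 0 hp, hget]
    · have hm : max 0 nums[k] = 0 := max_eq_left (by omega)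
      have hp : ¬ nums.getD k 0 > 0 := by omega
      simp only [hm, if_neg h]
      rw [pv_visAux_neg nums k 0 hp]

-- ===== VERDICT (by name: the statement is the Claim_ definition above) =====
theorem sunline_spec : Claim_equal_sunline := by
  intro nums _
  show sunline nums = sunline_alt nums
  unfold sunline sunline_alt
  rw [pv_go_eq_visAux nums nums.length 0 []]
  have h := pv_fold_prefix nums nums.length le_rfl
  rw [List.take_length] at h
  simp [h]
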